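-- pv_equiv track=rewrite | github.com/MrBrantCode/unitest_baseline | mut_generate/mist_train_taco/taco_12352/solution.py | maximize_alice_sum
-- ===== SOURCE A (Python) =====
-- def maximize_alice_sum(s: int, n: int) -> list[int]:
--     """
--     Given a sum `s` and a number of integers `n`, this function returns `n` positive integers
--     such that when these integers are interpreted as base-11 numbers, their sum is maximized.
--
--     Parameters:
--     s (int): The sum of the numbers in base-10.
--     n (int): The number of positive integers to be written on the board.
--
--     Returns:
--     list[int]: A list of `n` positive integers that maximize the sum when interpreted in base-11.
--     """
--     if n == 1:
--         return [s]
--     else: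
--         ss = str(s)
--         l = len(ss)
--         cc = 10 ** (l - 1)
--         while s - cc < n - 1:
--             cc //= 10
--         return maximize_alice_sum(s - cc, n - 1) + [cc]
-- ===== SOURCE B (Python) =====
-- def maximize_alice_sum(s: int, n: int) -> list[int]:
--     chunks = []
--     while n > 1:
--         cc = 10 ** (len(str(s)) - 1)
--         while s - cc < n - 1:
--             cc //= 10
--         chunks.append(cc)
--         s -= cc
--         n -= 1
--     return [s] + chunks[::-1]
-- ===== Notes on version B (the rewrite author's own statement) =====
-- stated objective: simpler
-- what changed: Replaced the tail-growing recursion by a single iterative loop that collects the n-1 greedy chunks in a list and returns [remaining s] plus the reversed chunk list.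
import Mathlib
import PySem

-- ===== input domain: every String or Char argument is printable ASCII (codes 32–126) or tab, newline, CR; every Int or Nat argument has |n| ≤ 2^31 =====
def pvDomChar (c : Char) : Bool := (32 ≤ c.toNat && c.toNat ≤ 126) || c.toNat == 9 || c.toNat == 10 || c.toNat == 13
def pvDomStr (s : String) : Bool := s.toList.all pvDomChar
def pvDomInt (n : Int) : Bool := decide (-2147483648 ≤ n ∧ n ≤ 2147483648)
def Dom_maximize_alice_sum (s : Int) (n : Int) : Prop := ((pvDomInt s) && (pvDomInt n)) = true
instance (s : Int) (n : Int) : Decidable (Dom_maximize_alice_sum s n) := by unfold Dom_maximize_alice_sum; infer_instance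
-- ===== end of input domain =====

-- B replaces A's tail-growing recursion by an iterative chunk-collecting loop plus a reversal (objective: simpler); same values on Pre_.


-- ===== PORT A =====
-- the inner 'while s - cc < n - 1: cc //= 10' loop (identical in both Pythons);
-- the 'cc ≤ 0' branch is a totality guard only: there Python's loop never terminates.
def pickCC (s : Int) (n : Int) (cc : Int) : Int :=
  if s - cc < n - 1 then
    if _h : cc ≤ 0 then cc
    else pickCC s n (PySem.Int.floordiv cc 10)
  else cc
termination_by cc.toNat
decreasing_by
  rw [PySem.Int.floordiv_eq_ediv_of_pos (by omega : (0:Int) < 10)]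
  omega

-- 'cc = 10 ** (len(str(s)) - 1)' followed by the while loop (shared text of both Pythons)
def pickChunk (s : Int) (n : Int) : Int :=
  let ss := PySem.Int.toChars s
  let l : Int := ss.length
  pickCC s n (10 ^ (l - 1).toNat)

-- literal port of A; the 'n < 1' branch is a totality guard only: there Python recurses forever.
def maximize_alice_sum (s : Int) (n : Int) : List Int :=
  if n = 1 then [s]
  else if _h : n < 1 then []
  else
    let cc := pickChunk s n
    maximize_alice_sum (s - cc) (n - 1) ++ [cc]
termination_by n.toNat
decreasing_by omega

-- ===== PORT B =====
-- the 'while n > 1' loop of Source B over the state (s, n, chunks)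
def altLoop (s : Int) (n : Int) (chunks : List Int) : Int × List Int :=
  if n > 1 then
    let cc := pickChunk s n
    altLoop (s - cc) (n - 1) (chunks ++ [cc])
  else (s, chunks)
termination_by n.toNat
decreasing_by omega

def maximize_alice_sum_alt (s : Int) (n : Int) : List Int :=
  let p := altLoop s n []
  [p.1] ++ p.2.reverse   -- chunks[::-1] ported as List.reverse

-- ===== PRECONDITION & SPEC =====
-- Pre_ excludes only inputs on which Python A never returns (it loops forever): n < 1, or n ≥ 2 with s < n - 1.
def Pre_maximize_alice_sum (s : Int) (n : Int) : Prop := 1 ≤ n ∧ (n = 1 ∨ n - 1 ≤ s)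
instance (s : Int) (n : Int) : Decidable (Pre_maximize_alice_sum s n) := by unfold Pre_maximize_alice_sum; infer_instance
def pvWitness_maximize_alice_sum : Int × Int := (10, 3)

def Spec_maximize_alice_sum (s : Int) (n : Int) (out : List Int) : Prop := out = maximize_alice_sum_alt s n
instance (s : Int) (n : Int) (out : List Int) : Decidable (Spec_maximize_alice_sum s n out) := by unfold Spec_maximize_alice_sum; infer_instance

-- ===== CLAIM (what is proved, stated in full; the proofs are below) =====
def Claim_equal_maximize_alice_sum : Prop := ∀ (s : Int) (n : Int), Dom_maximize_alice_sum s n → Pre_maximize_alice_sum s n → Spec_maximize_alice_sum s n (maximize_alice_sum s n)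

-- ===== LEMMAS AND PROOFS =====

-- the inner loop's postcondition: if s ≥ n - 1 on entry, the chosen cc leaves s - cc ≥ n - 1
theorem pickCC_post (s n cc : Int) (h : n - 1 ≤ s) : n - 1 ≤ s - pickCC s n cc := by
  rw [pickCC]
  split_ifs with h1 h2
  · omega
  · exact pickCC_post s n (PySem.Int.floordiv cc 10) h
  · omega
termination_by cc.toNat
decreasing_by
  rw [PySem.Int.floordiv_eq_ediv_of_pos (by omega : (0:Int) < 10)]
  omega

theorem pickChunk_post (s n : Int) (h : n - 1 ≤ s) : n - 1 ≤ s - pickChunk s n :=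
  pickCC_post s n _ h

-- the accumulator of altLoop is a prefix of the result
theorem altLoop_acc (s n : Int) (acc : List Int) :
    altLoop s n acc = ((altLoop s n []).1, acc ++ (altLoop s n []).2) := by
  by_cases h : n > 1
  · rw [altLoop, if_pos h, altLoop_acc (s - pickChunk s n) (n - 1) (acc ++ [pickChunk s n])]
    conv_rhs => rw [altLoop, if_pos h,
      altLoop_acc (s - pickChunk s n) (n - 1) ([] ++ [pickChunk s n])]
    simp
  · rw [altLoop, if_neg h, altLoop, if_neg h]
    simp
termination_by n.toNat
decreasing_by all_goals omega

theorem main_eq (s n : Int) (h1 : 1 ≤ n) (h2 : n = 1 ∨ n - 1 ≤ s) :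
    maximize_alice_sum s n = maximize_alice_sum_alt s n := by
  by_cases hn : n = 1
  · subst hn
    rw [maximize_alice_sum]
    simp [maximize_alice_sum_alt, altLoop]
  · have hn2 : 2 ≤ n := by omega
    have hs : n - 1 ≤ s := by omega
    have hpost := pickChunk_post s n hs
    rw [maximize_alice_sum, if_neg hn, dif_neg (by omega : ¬ n < 1)]
    show maximize_alice_sum (s - pickChunk s n) (n - 1) ++ [pickChunk s n] = maximize_alice_sum_alt s n
    rw [main_eq (s - pickChunk s n) (n - 1) (by omega) (by omega)]
    simp only [maximize_alice_sum_alt]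
    conv_rhs => rw [altLoop, if_pos (by omega : n > 1),
      altLoop_acc (s - pickChunk s n) (n - 1) ([] ++ [pickChunk s n])]
    simp
termination_by n.toNat
decreasing_by omega

-- ===== VERDICT (by name: the statement is the Claim_ definition above) =====
theorem maximize_alice_sum_spec : Claim_equal_maximize_alice_sum := by
  intro s n _ hpre
  exact main_eq s n hpre.1 hpre.2
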